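-- pv_equiv track=rewrite | github.com/Armand028/Python- | for_loop.py | oPify
-- ===== SOURCE A (Python) =====
-- def oPify(s):
--
--     '''(str)->str
--         this function returns string s with letters op inserted in it
--     '''
--     if len(s)<=1:
--         return s
--     result=""
--     for i in range(len(s)-1):
--             a=s[i]
--             b=s[i+1]
--             if a.isalpha() and b.isalpha():
--                     result=result+a
--                     if a.isupper():
--                             result=result+'O'
--                     else:
--                             result=result+'o'
--
--                     if b.isupper():
--                             result=result+'P'
--                     else:
--                             result=result+'p'
--             else:result=result+a
--     result=result+b
--     return result
-- ===== SOURCE B (Python) =====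
-- import re
--
-- def oPify(s):
--     def repl(m):
--         a, b = m.group(1), m.group(2)
--         if a.isalpha() and b.isalpha():
--             return a + ('O' if a.isupper() else 'o') + ('P' if b.isupper() else 'p')
--         return a
--     return re.sub(r'(.)(?=(.))', repl, s, flags=re.S)
-- ===== Notes on version B (the rewrite author's own statement) =====
-- stated objective: idiomatic
-- what changed: Replaced the explicit index loop with string concatenation by a single re.sub over overlapping adjacent-character pairs (r'(.)(?=(.))' with re.DOTALL) whose callback inserts the o/O p/P markers; the final character is left to re.sub's copy-through instead of an explicit append.
import Mathlib
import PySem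

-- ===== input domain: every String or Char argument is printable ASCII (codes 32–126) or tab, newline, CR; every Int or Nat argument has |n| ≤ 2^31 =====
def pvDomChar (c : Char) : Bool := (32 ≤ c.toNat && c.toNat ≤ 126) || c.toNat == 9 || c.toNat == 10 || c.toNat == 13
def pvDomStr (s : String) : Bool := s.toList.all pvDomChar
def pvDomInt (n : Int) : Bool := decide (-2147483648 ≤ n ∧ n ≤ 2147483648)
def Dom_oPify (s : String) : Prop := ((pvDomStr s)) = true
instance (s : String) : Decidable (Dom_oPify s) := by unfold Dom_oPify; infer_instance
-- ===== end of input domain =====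

-- B replaces A's index loop by a single regex substitution over adjacent pairs (idiomatic); same result, same cost.

-- ===== PORT A =====
-- literal port of A: index loop over range(len(s)-1), appending to result; b is the
-- loop-carried variable read after the loop, so the fold state is (result, b).
def oPify (s : String) : String :=
  if s.toList.length ≤ 1 then s
  else
    let st := (PySem.List.pyRange 0 ((s.toList.length : Int) - 1) 1).foldl
      (fun (st : List Char × Char) i =>
        let a := PySem.List.pyGetD s.toList i ' '
        let b := PySem.List.pyGetD s.toList (i + 1) ' '
        (if PySem.Chars.isalpha a && PySem.Chars.isalpha b then
          st.1 ++ [a, if PySem.Chars.isupper a then 'O' else 'o',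
                      if PySem.Chars.isupper b then 'P' else 'p']
         else st.1 ++ [a], b)) ([], ' ')
    String.ofList (st.1 ++ [st.2])

-- ===== PORT B =====
-- port of Source B: the regex r'(.)(?=(.))' with re.DOTALL matches every char that has a
-- successor (overlapping pairs = toList.zip toList.tail); pvRepl is the repl callback;
-- the final unmatched char (drop (len-1)) is copied through unchanged by re.sub.
def pvRepl (a b : Char) : List Char :=
  if PySem.Chars.isalpha a && PySem.Chars.isalpha b then
    [a, if PySem.Chars.isupper a then 'O' else 'o', if PySem.Chars.isupper b then 'P' else 'p']
  else [a]

def oPify_alt (s : String) : String :=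
  String.ofList ((s.toList.zip s.toList.tail).flatMap (fun p => pvRepl p.1 p.2)
    ++ s.toList.drop (s.toList.length - 1))

-- ===== PRECONDITION & SPEC =====
def Spec_oPify (s : String) (out : String) : Prop := out = oPify_alt s
instance (s : String) (out : String) : Decidable (Spec_oPify s out) := by unfold Spec_oPify; infer_instance

-- ===== CLAIM (what is proved, stated in full; the proofs are below) =====
def Claim_equal_oPify : Prop := ∀ (s : String), Dom_oPify s → Spec_oPify s (oPify s)

-- ===== LEMMAS AND PROOFS =====

-- a fold whose second state component is overwritten at every step splits into
-- (fold of the first component, g of the last element)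
theorem pv_foldl_pair (l : List Int) (f : List Char → Int → List Char) (g : Int → Char)
    (r0 : List Char) (b0 : Char) :
    (l.foldl (fun st i => (f st.1 i, g i)) (r0, b0)) =
      (l.foldl f r0, match l.getLast? with | none => b0 | some i => g i) := by
  induction l generalizing r0 b0 with
  | nil => simp
  | cons x xs ih =>
      simp only [List.foldl_cons, ih]
      cases xs with
      | nil => simp
      | cons y ys =>
          cases hl : (y :: ys).getLast? with
          | none => simp at hl
          | some v => simp [hl]

theorem pv_zip_getD (cs : List Char) (i : Int) (h0 : 0 ≤ i) (h1 : i < (cs.length : Int) - 1) :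
    PySem.List.pyGetD (cs.zip cs.tail) i (' ', ' ') =
      (PySem.List.pyGetD cs i ' ', PySem.List.pyGetD cs (i + 1) ' ') := by
  obtain ⟨k, rfl⟩ : ∃ k : Nat, i = (k : Int) := ⟨i.toNat, by omega⟩
  have h1' : ((k : Int) + 1) = ((k + 1 : Nat) : Int) := by push_cast; ring
  have htl : cs.tail.length = cs.length - 1 := by simp
  have hzl : (cs.zip cs.tail).length = cs.length - 1 := by
    simp only [List.length_zip, htl]
    omega
  rw [h1', PySem.List.pyGetD_natCast, PySem.List.pyGetD_natCast, PySem.List.pyGetD_natCast]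
  rw [List.getD_eq_getElem _ _ (by omega), List.getElem_zip,
      List.getD_eq_getElem _ _ (by omega), List.getD_eq_getElem _ _ (by omega)]
  have := List.getElem_tail (l := cs) (i := k) (by omega)
  simp [this]

-- ===== VERDICT (by name: the statement is the Claim_ definition above) =====
theorem oPify_spec : Claim_equal_oPify := by
  intro s _
  unfold Spec_oPify oPify oPify_alt
  by_cases hle : s.toList.length ≤ 1
  · rw [if_pos hle]
    have ht : s.toList.tail = [] := by
      cases h : s.toList with
      | nil => rfl
      | cons c t =>
          rw [h] at hle
          simp only [List.length_cons] at hle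
          have : t = [] := by rw [← List.length_eq_zero_iff]; omega
          simp [this]
    have hd : s.toList.drop (s.toList.length - 1) = s.toList := by
      have h0 : s.toList.length - 1 = 0 := by omega
      rw [h0, List.drop_zero]
    rw [ht, List.zip_nil_right, hd]
    simp
  · rw [if_neg hle]
    have h2 : 2 ≤ s.toList.length := by omega
    set cs := s.toList with hcs
    rw [pv_foldl_pair _
        (fun r i => if PySem.Chars.isalpha (PySem.List.pyGetD cs i ' ') &&
                      PySem.Chars.isalpha (PySem.List.pyGetD cs (i+1) ' ') then
                      r ++ [PySem.List.pyGetD cs i ' ',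
                            if PySem.Chars.isupper (PySem.List.pyGetD cs i ' ') then 'O' else 'o',
                            if PySem.Chars.isupper (PySem.List.pyGetD cs (i+1) ' ') then 'P' else 'p']
                    else r ++ [PySem.List.pyGetD cs i ' '])
        (fun i => PySem.List.pyGetD cs (i+1) ' ')]
    have hlast : (PySem.List.pyRange 0 ((cs.length : Int) - 1) 1).getLast? =
        some ((cs.length : Int) - 2) := by
      have hL : (cs.length : Int) - 1 = ((cs.length : Int) - 2) + 1 := by ring
      rw [hL, PySem.List.pyRange_one_succ_right (by omega)]
      exact List.getLast?_concat
    have hzl : ((cs.zip cs.tail).length : Int) = (cs.length : Int) - 1 := by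
      simp only [List.length_zip, List.length_tail]
      omega
    have hfold : (PySem.List.pyRange 0 ((cs.length : Int) - 1) 1).foldl
        (fun r i => if PySem.Chars.isalpha (PySem.List.pyGetD cs i ' ') &&
                      PySem.Chars.isalpha (PySem.List.pyGetD cs (i+1) ' ') then
                      r ++ [PySem.List.pyGetD cs i ' ',
                            if PySem.Chars.isupper (PySem.List.pyGetD cs i ' ') then 'O' else 'o',
                            if PySem.Chars.isupper (PySem.List.pyGetD cs (i+1) ' ') then 'P' else 'p']
                    else r ++ [PySem.List.pyGetD cs i ' ']) [] =
        (cs.zip cs.tail).flatMap (fun p => pvRepl p.1 p.2) := by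
      rw [← hzl]
      rw [PySem.List.foldl_congr_mem (g := fun r i =>
            r ++ (fun p => pvRepl p.1 p.2) (PySem.List.pyGetD (cs.zip cs.tail) i (' ', ' ')))]
      · rw [PySem.List.foldl_pyRange_zero_pyGetD' (cs.zip cs.tail) (' ', ' ')
            (fun r p => r ++ pvRepl p.1 p.2) []]
        rw [PySem.List.foldl_append_eq_flatMap]
        simp
      · intro acc i hi
        rw [PySem.List.mem_pyRange_one] at hi
        rw [pv_zip_getD cs i hi.1 (by omega)]
        simp only [pvRepl]
        split <;> simp
    rw [hfold, hlast]
    simp only []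
    have hL2 : (cs.length : Int) - 2 + 1 = (cs.length : Int) - 1 := by ring
    have hne : cs ≠ [] := by intro h; rw [h] at h2; simp at h2
    rw [hL2, PySem.List.pyGetD_eq_getElem cs ' ' (by omega) (by omega),
        List.drop_length_sub_one hne]
    have hidx : ((cs.length : Int) - 1).toNat = cs.length - 1 := by omega
    simp [hidx, List.getLast_eq_getElem]
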